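-- pv_equiv track=rewrite | github.com/Tsahi-Elkayam/clouptimizer | src/analysis/advanced_optimization.py | _group_into_phases
-- ===== SOURCE A (Python) =====
-- from typing import List, Dict, Any, Optional, Tuple, Set
--
-- def _group_into_phases(order: List[str], graph: Dict[str, Set[str]]) -> List[List[str]]:
--     """Group resources into optimization phases"""
--     phases = []
--     processed = set()
--
--     for resource in order:
--         if resource in processed:
--             continue
--
--         # Find all resources that can be processed in parallel
--         phase = [resource]
--         processed.add(resource)
--
--         for other in order:
--             if other not in processed:
--                 # Check if they have dependencies on each other
--                 if (other not in graph.get(resource, set()) and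
--                     resource not in graph.get(other, set())):
--                     phase.append(other)
--                     processed.add(other)
--
--         phases.append(phase)
--
--     return phases
-- ===== SOURCE B (Python) =====
-- from typing import List, Dict, Set
--
-- def _group_into_phases(order: List[str], graph: Dict[str, Set[str]]) -> List[List[str]]:
--     """Group resources into optimization phases (worklist over the remaining set)."""
--     phases = []
--     empty = ()
--     get = graph.get
--     remaining = list(dict.fromkeys(order))  # distinct resources, first-occurrence order
--     while remaining:
--         it = iter(remaining)
--         seed = next(it)
--         deps = get(seed, empty)
--         phase, nxt = [seed], []
--         keep, defer = phase.append, nxt.append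
--         for other in it:
--             if other not in deps and seed not in get(other, empty):
--                 keep(other)
--             else:
--                 defer(other)
--         phases.append(phase)
--         remaining = nxt
--     return phases
-- ===== Notes on version B (the rewrite author's own statement) =====
-- stated objective: alternative
-- what changed: A rescans the full order list for every phase, skipping members of a growing processed set; B dedups order once into a worklist and, per phase, partitions only the still-remaining resources into the phase and the next worklist, so emitted resources are never revisited (measured ~1.1-1.5x, not consistently faster).
import Mathlib
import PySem

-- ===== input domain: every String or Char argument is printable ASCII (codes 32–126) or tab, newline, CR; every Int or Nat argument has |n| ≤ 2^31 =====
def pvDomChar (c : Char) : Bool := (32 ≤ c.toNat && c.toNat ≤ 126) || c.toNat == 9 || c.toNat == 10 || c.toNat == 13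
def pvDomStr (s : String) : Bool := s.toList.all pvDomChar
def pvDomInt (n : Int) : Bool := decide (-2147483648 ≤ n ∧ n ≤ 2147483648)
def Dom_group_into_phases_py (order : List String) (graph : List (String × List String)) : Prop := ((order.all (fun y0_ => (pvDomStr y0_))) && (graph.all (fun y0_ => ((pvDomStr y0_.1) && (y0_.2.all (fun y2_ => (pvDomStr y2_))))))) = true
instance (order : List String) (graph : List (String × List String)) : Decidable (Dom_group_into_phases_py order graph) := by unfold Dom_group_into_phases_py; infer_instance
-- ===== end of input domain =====

-- B replaces A's repeated full scans of `order` (skipping processed set members) by a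
-- worklist of the remaining distinct resources, partitioned at each phase; return-value equivalence.

-- ===== PORT A =====
-- the parallel-compatibility test A performs for each candidate `other` against the phase seed
def pvOk (g : PySem.Dict String (List String)) (seed other : String) : Bool :=
  !((g.getD seed []).contains other) && !((g.getD other []).contains seed)

def group_into_phases_py (order : List String) (graph : List (String × List String)) : List (List String) :=
  let g := PySem.Dict.ofList graph
  (order.foldl (fun (st : List (List String) × PySem.Set String) resource =>
    if PySem.Set.contains st.2 resource then st
    else
      let inner := order.foldl (fun (st2 : List String × PySem.Set String) other =>
        if PySem.Set.contains st2.2 other then st2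
        else if pvOk g resource other then
          (st2.1 ++ [other], PySem.Set.add st2.2 other)
        else st2) ([resource], PySem.Set.add st.2 resource)
      (st.1 ++ [inner.1], inner.2)) ([], PySem.Set.empty)).1

-- ===== PORT B =====
def pvGo (g : PySem.Dict String (List String)) : List String → List (List String)
  | [] => []
  | seed :: rest =>
    let p := rest.partition (pvOk g seed)
    (seed :: p.1) :: pvGo g p.2
termination_by l => l.length
decreasing_by
  simp only [List.partition_eq_filter_filter]
  exact Nat.lt_succ_of_le (List.length_filter_le _ _)

def group_into_phases_py_alt (order : List String) (graph : List (String × List String)) : List (List String) :=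
  pvGo (PySem.Dict.ofList graph) (PySem.List.dedup order)

-- ===== PRECONDITION & SPEC =====
def Spec_group_into_phases_py (order : List String) (graph : List (String × List String)) (out : List (List String)) : Prop := out = group_into_phases_py_alt order graph
instance (order : List String) (graph : List (String × List String)) (out : List (List String)) : Decidable (Spec_group_into_phases_py order graph out) := by unfold Spec_group_into_phases_py; infer_instance

-- ===== CLAIM (what is proved, stated in full; the proofs are below) =====
def Claim_equal_group_into_phases_py : Prop := ∀ (order : List String) (graph : List (String × List String)), Dom_group_into_phases_py order graph → Spec_group_into_phases_py order graph (group_into_phases_py order graph)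

-- ===== LEMMAS AND PROOFS =====

theorem pv_contains_add (S : PySem.Set String) (x y : String) :
    PySem.Set.contains (PySem.Set.add S x) y = (PySem.Set.contains S y || y == x) := by
  rw [PySem.Set.add_eq_ite]
  split_ifs with h
  · cases hyx : (y == x)
    · simp
    · have : y = x := by simpa using hyx
      subst this
      simp [h]
  · simp [beq_eq_decide]

theorem pv_contains_update (S : PySem.Set String) (xs : List String) (y : String) :
    PySem.Set.contains (PySem.Set.update S xs) y = (PySem.Set.contains S y || xs.contains y) := by
  induction xs generalizing S with
  | nil => simp [PySem.Set.update_nil]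
  | cons a xs ih =>
    rw [PySem.Set.update_cons, ih, pv_contains_add]
    cases hya : (y == a)
    · have hne : y ≠ a := by simpa using hya
      simp [hne]
    · have heq : y = a := by simpa using hya
      simp [heq]

def pvRemOf (S : PySem.Set String) : List String → List String
  | [] => []
  | x :: l => if PySem.Set.contains S x then pvRemOf S l else x :: pvRemOf (PySem.Set.add S x) l

theorem pvRemOf_congr (S T : PySem.Set String)
    (h : ∀ z, PySem.Set.contains S z = PySem.Set.contains T z) (l : List String) :
    pvRemOf S l = pvRemOf T l := by
  induction l generalizing S T with
  | nil => rfl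
  | cons x l ih =>
    simp only [pvRemOf, h x]
    split_ifs with hx
    · exact ih S T h
    · exact congrArg _ (ih _ _ (fun z => by rw [pv_contains_add, pv_contains_add, h z]))

theorem pv_not_mem_remOf (S : PySem.Set String) (l : List String) (x : String)
    (h : PySem.Set.contains S x = true) : x ∉ pvRemOf S l := by
  induction l generalizing S with
  | nil => simp [pvRemOf]
  | cons y l ih =>
    simp only [pvRemOf]
    split_ifs with hy
    · exact ih S h
    · intro hmem
      rcases List.mem_cons.mp hmem with rfl | hmem
      · exact hy h
      · exact ih _ (by rw [pv_contains_add, h]; rfl) hmem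

theorem pvRemOf_append (S : PySem.Set String) (pre l : List String)
    (h : ∀ y ∈ pre, PySem.Set.contains S y = true) :
    pvRemOf S (pre ++ l) = pvRemOf S l := by
  induction pre with
  | nil => rfl
  | cons a pre ih =>
    simp only [List.cons_append, pvRemOf, h a (by simp)]
    simp only [if_true]
    exact ih (fun y hy => h y (by simp [hy]))

theorem pv_filter_remOf_add (q : String → Bool) (x : String) (hq : q x = false) :
    ∀ (l : List String) (S : PySem.Set String),
    (pvRemOf (PySem.Set.add S x) l).filter q = (pvRemOf S l).filter q := by
  intro l
  induction l with
  | nil => intro S; rfl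
  | cons y l ih =>
    intro S
    simp only [pvRemOf, pv_contains_add]
    cases hSy : PySem.Set.contains S y
    · cases hyx : (y == x)
      · simp only [Bool.or_false]
        rw [if_neg (by simp), if_neg (by simp)]
        simp only [List.filter_cons]
        rw [pvRemOf_congr (PySem.Set.add (PySem.Set.add S x) y) (PySem.Set.add (PySem.Set.add S y) x)
          (fun z => by rw [pv_contains_add, pv_contains_add, pv_contains_add, pv_contains_add]; ac_rfl)]
        rw [ih (PySem.Set.add S y)]
      · have : y = x := by simpa using hyx
        subst this
        simp only [Bool.or_true, if_true]
        rw [if_neg (by simp)]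
        simp only [List.filter_cons, hq]
        exact (ih S).symm ▸ rfl
    · simp only [Bool.true_or, if_true]
      exact ih S

theorem pv_inner (q : String → Bool) (l : List String) (phase : List String) (S : PySem.Set String) :
    l.foldl (fun (st2 : List String × PySem.Set String) other =>
        if PySem.Set.contains st2.2 other then st2
        else if q other then (st2.1 ++ [other], PySem.Set.add st2.2 other)
        else st2) (phase, S)
      = (phase ++ (pvRemOf S l).filter q, PySem.Set.update S ((pvRemOf S l).filter q)) := by
  induction l generalizing phase S with
  | nil => simp [pvRemOf, PySem.Set.update_nil]
  | cons x l ih =>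
    simp only [List.foldl_cons, pvRemOf]
    split_ifs with hx hq
    · rw [ih]
    · rw [ih]
      simp [hq, PySem.Set.update_cons]
    · have hq' : q x = false := by simpa using hq
      rw [ih, List.filter_cons, hq']
      rw [pv_filter_remOf_add q x hq' l S]
      simp


theorem pv_remOf_update (q : String → Bool) :
    ∀ (l : List String) (T : PySem.Set String),
    pvRemOf (PySem.Set.update T ((pvRemOf T l).filter q)) l
      = (pvRemOf T l).filter (fun y => !(q y)) := by
  intro l
  induction l with
  | nil => intro T; rfl
  | cons y l ih =>
    intro T
    simp only [pvRemOf]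
    cases hTy : PySem.Set.contains T y
    · simp only [Bool.false_eq_true, if_false]
      simp only [List.filter_cons]
      cases hqy : q y
      · simp only [Bool.false_eq_true, if_false, Bool.not_false, if_true]
        have hynR : y ∉ pvRemOf (PySem.Set.add T y) l :=
          pv_not_mem_remOf _ _ _ (by rw [pv_contains_add]; simp)
        have hcontU : PySem.Set.contains
            (PySem.Set.update T ((pvRemOf (PySem.Set.add T y) l).filter q)) y = false := by
          rw [pv_contains_update, hTy]
          simp only [Bool.false_or, List.contains_eq_mem, decide_eq_false_iff_not]
          exact fun h => hynR (List.mem_of_mem_filter h)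
        rw [if_neg (by rw [hcontU]; simp)]
        congr 1
        rw [pvRemOf_congr
          (PySem.Set.add (PySem.Set.update T ((pvRemOf (PySem.Set.add T y) l).filter q)) y)
          (PySem.Set.update (PySem.Set.add T y) ((pvRemOf (PySem.Set.add T y) l).filter q))
          (fun z => by
            rw [pv_contains_add, pv_contains_update, pv_contains_update, pv_contains_add]; ac_rfl)]
        exact ih (PySem.Set.add T y)
      · simp only [if_true, Bool.not_true, Bool.false_eq_true, if_false]
        rw [PySem.Set.update_cons]
        have hcont : PySem.Set.contains
            (PySem.Set.update (PySem.Set.add T y) ((pvRemOf (PySem.Set.add T y) l).filter q)) y = true := by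
          rw [pv_contains_update, pv_contains_add]
          simp
        rw [if_pos hcont]
        exact ih (PySem.Set.add T y)
    · simp only [if_true]
      have hcont : PySem.Set.contains
          (PySem.Set.update T ((pvRemOf T l).filter q)) y = true := by
        rw [pv_contains_update, hTy]; rfl
      rw [if_pos hcont]
      exact ih T

theorem pv_append_remOf : ∀ (l : List String) (S : PySem.Set String),
    S ++ pvRemOf S l = PySem.Set.update S l := by
  intro l
  induction l with
  | nil => intro S; simp [pvRemOf, PySem.Set.update_nil]
  | cons x l ih =>
    intro S
    rw [PySem.Set.update_cons]
    simp only [pvRemOf]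
    cases hx : PySem.Set.contains S x
    · simp only [Bool.false_eq_true, if_false]
      have : PySem.Set.add S x = S ++ [x] :=
        PySem.Set.add_of_not_mem (by simpa using hx)
      rw [← ih (PySem.Set.add S x), this]
      simp
    · simp only [if_true]
      have : PySem.Set.add S x = S := PySem.Set.add_of_mem (by simpa using hx)
      rw [this, ← ih S]

theorem pv_remOf_empty (l : List String) : pvRemOf PySem.Set.empty l = PySem.List.dedup l := by
  have h := pv_append_remOf l PySem.Set.empty
  simpa [PySem.Set.empty, PySem.Set.update_nil_left] using h

theorem pv_outer (g : PySem.Dict String (List String)) (order : List String) :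
    ∀ (l pre : List String) (phases : List (List String)) (S : PySem.Set String),
      order = pre ++ l → (∀ y ∈ pre, PySem.Set.contains S y = true) →
      (l.foldl (fun (st : List (List String) × PySem.Set String) resource =>
        if PySem.Set.contains st.2 resource then st
        else
          let inner := order.foldl (fun (st2 : List String × PySem.Set String) other =>
            if PySem.Set.contains st2.2 other then st2
            else if pvOk g resource other then
              (st2.1 ++ [other], PySem.Set.add st2.2 other)
            else st2) ([resource], PySem.Set.add st.2 resource)
          (st.1 ++ [inner.1], inner.2)) (phases, S)).1
        = phases ++ pvGo g (pvRemOf S l) := by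
  intro l
  induction l with
  | nil => intro pre phases S _ _; simp [pvRemOf, pvGo]
  | cons x l ih =>
    intro pre phases S hord hpre
    simp only [List.foldl_cons]
    by_cases hx : PySem.Set.contains S x = true
    · rw [if_pos hx]
      have hrem : pvRemOf S (x :: l) = pvRemOf S l := by simp only [pvRemOf]; rw [if_pos hx]
      rw [hrem]
      exact ih (pre ++ [x]) phases S (by rw [hord]; simp)
        (fun y hy => by
          rcases List.mem_append.mp hy with h | h
          · exact hpre y h
          · simp at h; subst h; exact hx)
    · rw [if_neg hx]
      rw [pv_inner (pvOk g x) order [x] (PySem.Set.add S x)]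
      have hconts : ∀ y ∈ pre ++ [x], PySem.Set.contains (PySem.Set.add S x) y = true := by
        intro y hy
        rw [pv_contains_add]
        rcases List.mem_append.mp hy with h | h
        · rw [hpre y h]; rfl
        · simp at h; subst h; simp
      have h1 : pvRemOf (PySem.Set.add S x) order = pvRemOf (PySem.Set.add S x) l := by
        rw [hord, show pre ++ x :: l = (pre ++ [x]) ++ l by simp]
        exact pvRemOf_append _ _ _ hconts
      rw [h1]
      rw [ih (pre ++ [x])
        (phases ++ [[x] ++ (pvRemOf (PySem.Set.add S x) l).filter (pvOk g x)])
        (PySem.Set.update (PySem.Set.add S x) ((pvRemOf (PySem.Set.add S x) l).filter (pvOk g x)))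
        (by rw [hord]; simp)
        (fun y hy => by rw [pv_contains_update, hconts y hy]; rfl)]
      rw [pv_remOf_update (pvOk g x) l (PySem.Set.add S x)]
      have hrem : pvRemOf S (x :: l) = x :: pvRemOf (PySem.Set.add S x) l := by
        simp only [pvRemOf]; rw [if_neg hx]
      rw [hrem]
      have hgo : pvGo g (x :: pvRemOf (PySem.Set.add S x) l)
          = (x :: (pvRemOf (PySem.Set.add S x) l).filter (pvOk g x))
            :: pvGo g ((pvRemOf (PySem.Set.add S x) l).filter (fun y => !(pvOk g x y))) := by
        rw [pvGo]
        rw [List.partition_eq_filter_filter]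
        rfl
      rw [hgo]
      simp

-- ===== VERDICT (by name: the statement is the Claim_ definition above) =====
theorem group_into_phases_py_spec : Claim_equal_group_into_phases_py := by
  intro order graph _
  unfold Spec_group_into_phases_py group_into_phases_py group_into_phases_py_alt
  rw [pv_outer (PySem.Dict.ofList graph) order order [] [] PySem.Set.empty (by simp) (by simp)]
  rw [pv_remOf_empty]
  simp
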